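-- pv_equiv track=rewrite | github.com/ameenetemady/SimpleProteinIdentification | run.py | trimPeps
-- ===== SOURCE A (Python) =====
-- def trimPeps(protInfo, seq):
--     pepsToDel = []
--     for strPep, __ in protInfo.items():
--         if seq.find(strPep) < 0:
--             pepsToDel.append(strPep)
--
--     for strPep in pepsToDel:
--         del protInfo[strPep]
--
--     return len(pepsToDel)
-- ===== SOURCE B (Python) =====
-- def trimPeps(protInfo, seq):
--     # Build, once, the set of ALL substrings of seq whose length is one of the
--     # (distinct) peptide lengths; then each peptide is tested by one hash lookup,
--     # replacing A's per-peptide scan of seq.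
--     lens = {len(p) for p in protInfo}
--     subs = {seq[i:i + L] for L in lens for i in range(len(seq) - L + 1)}
--     kept = {p: v for p, v in protInfo.items() if p in subs}
--     removed = len(protInfo) - len(kept)
--     protInfo.clear()
--     protInfo.update(kept)
--     return removed
-- ===== Notes on version B (the rewrite author's own statement) =====
-- stated objective: faster
-- what changed: Instead of scanning seq once per peptide with seq.find, B builds a hash set of all substrings of seq of the (distinct) peptide lengths in one pass over seq per distinct length, then tests each peptide by a single set lookup and counts the kept entries.
import Mathlib
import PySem

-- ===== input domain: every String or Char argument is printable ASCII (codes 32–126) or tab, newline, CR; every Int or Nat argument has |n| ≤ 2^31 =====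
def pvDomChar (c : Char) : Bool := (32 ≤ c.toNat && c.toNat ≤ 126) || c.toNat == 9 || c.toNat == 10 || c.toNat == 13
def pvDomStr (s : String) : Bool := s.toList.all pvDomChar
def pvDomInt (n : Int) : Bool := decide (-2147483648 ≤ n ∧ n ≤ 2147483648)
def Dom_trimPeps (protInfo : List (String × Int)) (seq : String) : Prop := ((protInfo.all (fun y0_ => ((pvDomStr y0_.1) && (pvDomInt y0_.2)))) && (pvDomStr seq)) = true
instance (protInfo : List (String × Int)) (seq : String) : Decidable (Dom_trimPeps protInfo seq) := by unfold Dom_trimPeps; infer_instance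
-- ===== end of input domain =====

-- B replaces A's per-peptide scan of seq by one precomputed set of all substrings of seq
-- of the distinct peptide lengths (objective: faster).  Both A and B also delete the
-- missing peptides from the caller's dict; that side effect is identical in both Pythons
-- and the theorems here are about the RETURN value only.

-- ===== PORT A =====
def trimPeps (protInfo : List (String × Int)) (seq : String) : Int :=
  let pepsToDel : List String :=
    protInfo.foldl (fun acc p => if PySem.Str.find seq p.1 < 0 then acc ++ [p.1] else acc) []
  -- the second loop only mutates the caller's dict (del protInfo[strPep]); no effect on the return value
  (pepsToDel.length : Int)

-- ===== PORT B =====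
def trimPeps_alt (protInfo : List (String × Int)) (seq : String) : Int :=
  let lens : List Int := PySem.Set.ofList (protInfo.map (fun p => PySem.Str.len p.1))
  let subs : List String := PySem.Set.ofList (lens.flatMap (fun L =>
      (PySem.List.pyRange 0 (PySem.Str.len seq - L + 1) 1).map
        (fun i => PySem.Str.slice seq (some i) (some (i + L)))))
  let kept := protInfo.filter (fun p => subs.contains p.1)
  (protInfo.length : Int) - (kept.length : Int)

-- ===== PRECONDITION & SPEC =====
-- Pre_ excludes association lists with duplicate keys: they do not represent any Python
-- dict input (a dict collapses duplicates), so A's behaviour on them is not defined.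
def Pre_trimPeps (protInfo : List (String × Int)) (seq : String) : Prop :=
  (protInfo.map Prod.fst).Nodup
instance (protInfo : List (String × Int)) (seq : String) : Decidable (Pre_trimPeps protInfo seq) := by
  unfold Pre_trimPeps; infer_instance
def pvWitness_trimPeps : (List (String × Int)) × String := ([("A", 1), ("XQ", 2)], "CAT")

def Spec_trimPeps (protInfo : List (String × Int)) (seq : String) (out : Int) : Prop := out = trimPeps_alt protInfo seq
instance (protInfo : List (String × Int)) (seq : String) (out : Int) : Decidable (Spec_trimPeps protInfo seq out) := by unfold Spec_trimPeps; infer_instance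

-- ===== CLAIM (what is proved, stated in full; the proofs are below) =====
def Claim_equal_trimPeps : Prop := ∀ (protInfo : List (String × Int)) (seq : String), Dom_trimPeps protInfo seq → Pre_trimPeps protInfo seq → Spec_trimPeps protInfo seq (trimPeps protInfo seq)

-- ===== LEMMAS AND PROOFS =====

-- A slice of the right shape is a substring; conversely every substring of length L
-- appears as the slice at some admissible start index.
lemma slice_mem_iff (s sub : List Char) :
    (∃ i : Int, (0 ≤ i ∧ i < (s.length : Int) - (sub.length : Int) + 1) ∧
      PySem.List.slice s (some i) (some (i + (sub.length : Int))) = sub) ↔ sub <:+: s := by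
  constructor
  · rintro ⟨i, ⟨h0, _⟩, hslice⟩
    obtain ⟨j, rfl⟩ := Int.eq_ofNat_of_zero_le h0
    rw [show ((j : Int) + (sub.length : Int)) = ((j : Nat) : Int) + ((sub.length : Nat) : Int) from rfl,
        PySem.List.slice_natCast_add] at hslice
    calc sub = List.take sub.length (List.drop j s) := hslice.symm
      _ <:+: s := ((List.take_prefix _ _).isInfix).trans (List.drop_suffix j s).isInfix
  · rintro ⟨t, u, rfl⟩
    refine ⟨(t.length : Int), ⟨by positivity, by simp; omega⟩, ?_⟩
    rw [show ((t.length : Int) + (sub.length : Int)) = ((t.length : Nat) : Int) + ((sub.length : Nat) : Int) from rfl,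
        PySem.List.slice_natCast_add]
    simp

-- membership in B's substring set, for a peptide whose length is one of the collected lengths
lemma mem_subs_iff (protInfo : List (String × Int)) (seq pep : String)
    (hpep : pep ∈ protInfo.map Prod.fst) :
    (pep ∈ PySem.Set.ofList ((PySem.Set.ofList (protInfo.map (fun p => PySem.Str.len p.1)) : List Int).flatMap (fun L =>
        (PySem.List.pyRange 0 (PySem.Str.len seq - L + 1) 1).map
          (fun i => PySem.Str.slice seq (some i) (some (i + L)))))) ↔
      pep.toList <:+: seq.toList := by
  rw [PySem.Set.mem_ofList, List.mem_flatMap]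
  constructor
  · rintro ⟨L, hL, hmem⟩
    rw [PySem.Set.mem_ofList, List.mem_map] at hL
    obtain ⟨q, _, rfl⟩ := hL
    rw [List.mem_map] at hmem
    obtain ⟨i, hi, rfl⟩ := hmem
    rw [PySem.List.mem_pyRange_one] at hi
    -- the slice is a take of a drop, hence an infix
    have h0 : 0 ≤ i := hi.1
    have hLnn : (0 : Int) ≤ PySem.Str.len q.1 := by rw [PySem.Str.len_eq]; positivity
    rw [PySem.Str.toList_slice, PySem.Chars.slice_eq_listSlice,
        PySem.List.slice_toNat seq.toList h0 (by omega)]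
    exact ((List.take_prefix _ _).isInfix).trans (List.drop_suffix _ _).isInfix
  · intro hinf
    refine ⟨PySem.Str.len pep, ?_, ?_⟩
    · rw [PySem.Set.mem_ofList, List.mem_map]
      rw [List.mem_map] at hpep
      obtain ⟨q, hq, rfl⟩ := hpep
      exact ⟨q, hq, rfl⟩
    · have hlen : pep.toList.length ≤ seq.toList.length := hinf.length_le
      obtain ⟨i, hi, hslice⟩ := (slice_mem_iff seq.toList pep.toList).2 hinf
      rw [List.mem_map]
      refine ⟨i, ?_, ?_⟩
      · rw [PySem.List.mem_pyRange_one, PySem.Str.len_eq]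
        exact ⟨hi.1, hi.2⟩
      · rw [← String.toList_inj, PySem.Str.toList_slice, PySem.Chars.slice_eq_listSlice,
            PySem.Str.len_eq]
        exact hslice

-- loop shape of A: the Prop-conditioned append-if fold (bridged to PySem.List.foldl_append_if)
lemma foldl_if_prop {α β : Type} (P : α → Prop) [DecidablePred P] (f : α → β)
    (l : List α) (acc : List β) :
    l.foldl (fun acc x => if P x then acc ++ [f x] else acc) acc
      = acc ++ (l.filter (fun x => decide (P x))).map f := by
  have h := PySem.List.foldl_append_if (fun x => decide (P x)) f l acc
  simpa using h

-- counting a property vs counting its complement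
lemma filter_complement_length {α : Type} (l : List α) (pa pb : α → Bool)
    (h : ∀ x ∈ l, pa x = !pb x) :
    ((l.filter pa).length : Int) = (l.length : Int) - ((l.filter pb).length : Int) := by
  have h1 : List.countP pa l = List.countP (fun x => !pb x) l :=
    List.countP_congr (fun x hx => by simp [h x hx])
  have h2 := @List.length_eq_countP_add_countP _ pb l
  have h3 : (fun a => decide ¬ pb a = true) = fun x => !pb x :=
    funext fun x => by cases pb x <;> simp
  rw [h3] at h2
  simp only [List.countP_eq_length_filter] at h1 h2
  omega

-- ===== VERDICT(by name: the statement is the Claim_ definition above) =====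
theorem trimPeps_spec : Claim_equal_trimPeps := by
  intro protInfo seq _ _
  show trimPeps protInfo seq = trimPeps_alt protInfo seq
  simp only [trimPeps, trimPeps_alt]
  rw [foldl_if_prop (fun p : String × Int => PySem.Str.find seq p.1 < 0) Prod.fst protInfo []]
  simp only [List.nil_append, List.length_map]
  refine filter_complement_length protInfo _ _ ?_
  intro p hp
  have hmem := mem_subs_iff protInfo seq p.1 (List.mem_map_of_mem hp)
  by_cases hin : p.1.toList <:+: seq.toList
  · have h1 : ¬ PySem.Str.find seq p.1 < 0 := by
      have := (PySem.Str.find_nonneg_iff seq p.1).2 hin; omega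
    have h2 := List.contains_iff_mem.2 (hmem.2 hin)
    rw [h2, Bool.not_true]
    exact decide_eq_false h1
  · have h1 : PySem.Str.find seq p.1 < 0 := by
      have hne : ¬ (0 ≤ PySem.Str.find seq p.1) := fun h =>
        hin ((PySem.Str.find_nonneg_iff seq p.1).1 h)
      omega
    have h2 : (_ : List String).contains p.1 = false :=
      Bool.eq_false_iff.2 (fun hc => hin (hmem.1 (List.contains_iff_mem.1 hc)))
    rw [h2, Bool.not_false]
    exact decide_eq_true h1
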